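-- pv_equiv track=rewrite | github.com/PyKev24/Mr_Kaiser | freecodecamp/project_1.py | glue
-- ===== SOURCE A (Python) =====
-- def normalizer(list_1, list_2):
--     """
--     La función devuelve las listas de modo que los i-elementos de cada lista tengan misma longitud.
--     Se rellena con espacios, en el ejemplo es con underscore para su legibilidad.
--     *Se agregan los 2 espacios a la izquierda porque es el objetivo.
--
--     Parameters
--     ----------
--     list_1 : LIST
--         Una lista de strings. Ejemplo: ['234', '9']
--     list_2 : LIST
--         Una lista de strings. Ejemplo: ['34', '10']
--
--     Returns
--     -------
--     list_1_normal : LIST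
--         Una lista de strings. Ejemplo: ['_ _234', '_ _ _9']
--     list_2_normal : LIST
--         Una lista de strings. Ejemplo: ['_ _ _34', '_ _10']
--
--     """
--     list_1_normal = []
--     list_2_normal = []
--     space = lambda a, b: abs(len(a) - len(b)) + 2   # el mas chico necesita la diferencia + 2 espacios
--
--     for a, b in zip(list_1, list_2):
--         if len(a) > len(b):
--             list_1_normal.append('  ' + a)          # '__numero'
--             list_2_normal.append(' ' * space(a, b) + b)
--         elif len(a) < len(b):
--             list_1_normal.append(' ' * space(a, b) + a)
--             list_2_normal.append('  ' + b)
--         else: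
--             list_1_normal.append('  '  + a)
--             list_2_normal.append('  ' + b)
--     return list_1_normal, list_2_normal
--
-- def glue(top, botton, results):
--     dashes = lambda x: '-' * len(x)
--     string_dashes = list(map(dashes, botton))
--
--
--     # falta normalizar los resultados
--     tmp_1, tmp_2 = normalizer(botton, results)
--     del_two_spaces = lambda string: string[2:]
--     results = list(map(del_two_spaces, tmp_2))
--
--     end = ''
--     for row in [top, botton, string_dashes, results]:
--         end += '    '.join(row) + '\n'
--
--     # le quitamos la cola de espacios con el rstrip
--     # es lo que pide en los test :(
--     return end[:-1].rstrip()
-- ===== SOURCE B (Python) =====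
-- def glue(top, botton, results):
--     # One simultaneous pass over botton (consuming results via an iterator)
--     # assembles rows 2-4 piece by piece: no normalizer helper, no intermediate
--     # padded lists, no per-row joins.
--     it = iter(results)
--     line2 = ''
--     line3 = ''
--     line4 = ''
--     first = True
--     for b in botton:
--         sep = '' if first else '    '
--         line2 += sep + b
--         line3 += sep + '-' * len(b)
--         r = next(it, None)
--         if r is not None:
--             line4 += sep + ' ' * (len(b) - len(r)) + r
--         first = False
--     return ('    '.join(top) + '\n' + line2 + '\n' + line3 + '\n' + line4).rstrip()
-- ===== Notes on version B (the rewrite author's own statement) =====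
-- stated objective: alternative
-- what changed: Replaces A's staged pipeline (normalizer helper padding two lists, a map stripping two spaces, a map for dashes, then a row-accumulating loop) with a single simultaneous recursive pass over botton/results that assembles rows 2-4 piece by piece with explicit separators, then concatenates the four lines once.
import Mathlib
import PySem

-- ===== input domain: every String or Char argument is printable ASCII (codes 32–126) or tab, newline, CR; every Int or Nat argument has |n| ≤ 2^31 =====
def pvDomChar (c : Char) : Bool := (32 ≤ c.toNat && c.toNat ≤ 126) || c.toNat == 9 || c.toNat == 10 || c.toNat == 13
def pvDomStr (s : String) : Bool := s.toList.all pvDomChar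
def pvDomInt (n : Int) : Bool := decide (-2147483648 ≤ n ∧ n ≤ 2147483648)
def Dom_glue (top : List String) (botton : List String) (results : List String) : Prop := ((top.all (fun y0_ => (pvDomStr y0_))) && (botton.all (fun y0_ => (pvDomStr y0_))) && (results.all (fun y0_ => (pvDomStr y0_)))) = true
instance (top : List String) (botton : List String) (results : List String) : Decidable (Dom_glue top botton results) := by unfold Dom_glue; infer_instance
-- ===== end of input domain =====

-- B replaces A's staged pipeline (normalizer helper, strip-two-spaces map, dashes map, row loop)
-- with one simultaneous recursive pass over botton/results assembling rows 2-4 piece by piece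
-- (objective: alternative decomposition; no speed claim).

-- ===== PORT A =====
-- helper 'normalizer' of A: pads the i-th strings of both lists (with 2 extra leading spaces)
-- to equal length; the loop 'for a, b in zip(...)' appending to two accumulators is a foldl
-- over the zip carrying the pair of accumulator lists. 'x + y' on strings is ported exactly
-- as String.ofList (x.toList ++ y.toList); ' ' * n as List.replicate.
def normalizer (list_1 : List String) (list_2 : List String) : List String × List String :=
  let space : String → String → Nat :=
    fun a b => (PySem.Str.len a - PySem.Str.len b).natAbs + 2
  let st := (list_1.zip list_2).foldl
    (fun (acc : List String × List String) ab =>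
      let a := ab.1; let b := ab.2
      if PySem.Str.len a > PySem.Str.len b then
        (acc.1 ++ [String.ofList ("  ".toList ++ a.toList)],
         acc.2 ++ [String.ofList (List.replicate (space a b) ' ' ++ b.toList)])
      else if PySem.Str.len a < PySem.Str.len b then
        (acc.1 ++ [String.ofList (List.replicate (space a b) ' ' ++ a.toList)],
         acc.2 ++ [String.ofList ("  ".toList ++ b.toList)])
      else
        (acc.1 ++ [String.ofList ("  ".toList ++ a.toList)],
         acc.2 ++ [String.ofList ("  ".toList ++ b.toList)]))
    ([], [])
  st

def glue (top : List String) (botton : List String) (results : List String) : String :=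
  let dashes : String → String := fun x => String.ofList (List.replicate (PySem.Str.len x).toNat '-')
  let string_dashes := botton.map dashes
  let tmp := normalizer botton results
  let del_two_spaces : String → String := fun string => PySem.Str.slice string (some 2) none
  let results' := tmp.2.map del_two_spaces
  -- 'end += "    ".join(row) + "\n"' over the literal four-row list
  let endStr := [top, botton, string_dashes, results'].foldl
    (fun acc row => String.ofList (acc.toList ++ (PySem.Str.join "    " row).toList ++ "\n".toList)) ""
  PySem.Str.rstrip (PySem.Str.slice endStr none (some (-1)))

-- ===== PORT B =====
-- the loop body of Source B: one pass over botton; the results iterator is carried as the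
-- not-yet-consumed suffix (next(it, None) = head of the suffix, None when empty);
-- ' ' * (len(b) - len(r)) with a possibly negative count is Int.toNat (negative -> empty), exact.
def glueStep (s : (List Char × List Char × List Char) × List String × Bool) (b : String) :
    (List Char × List Char × List Char) × List String × Bool :=
  let sep : List Char := if s.2.2 then [] else "    ".toList
  let l2 := s.1.1 ++ sep ++ b.toList
  let l3 := s.1.2.1 ++ sep ++ List.replicate (PySem.Str.len b).toNat '-'
  match s.2.1 with
  | r :: rt =>
    ((l2, l3, s.1.2.2 ++ sep ++ List.replicate ((PySem.Str.len b - PySem.Str.len r).toNat) ' ' ++ r.toList),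
     rt, false)
  | [] => ((l2, l3, s.1.2.2), [], false)

def glue_alt (top : List String) (botton : List String) (results : List String) : String :=
  let st := botton.foldl glueStep (([], [], []), results, true)
  PySem.Str.rstrip (String.ofList
    ((PySem.Str.join "    " top).toList ++ '\n' :: st.1.1 ++ '\n' :: st.1.2.1 ++ '\n' :: st.1.2.2))

-- ===== PRECONDITION & SPEC =====
def Spec_glue (top : List String) (botton : List String) (results : List String) (out : String) : Prop := out = glue_alt top botton results
instance (top : List String) (botton : List String) (results : List String) (out : String) : Decidable (Spec_glue top botton results out) := by unfold Spec_glue; infer_instance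

-- ===== CLAIM =====
def Claim_equal_glue : Prop := ∀ (top : List String) (botton : List String) (results : List String), Dom_glue top botton results → Spec_glue top botton results (glue top botton results)

-- ===== LEMMAS AND PROOFS =====

-- the '    '-piece contributed to row 4 for one (botton, result) pair
def pieceOf (b r : String) : List Char :=
  List.replicate ((PySem.Str.len b - PySem.Str.len r).toNat) ' ' ++ r.toList

-- 'each element prefixed by the separator' — the shape rows take once first = false
def pref (l : List (List Char)) : List Char := l.flatMap (fun x => "    ".toList ++ x)

lemma join_eq_head_pref (sep : List Char) (x : List Char) (xs : List (List Char)) :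
    PySem.Chars.join sep (x :: xs) = x ++ xs.flatMap (fun y => sep ++ y) := by
  induction xs generalizing x with
  | nil => simp [PySem.Chars.join_singleton]
  | cons y ys ih => rw [PySem.Chars.join_cons_cons, ih]; simp

-- characterization of the loop with first = false, accumulators generalized
lemma glueStep_foldl_false (bs rs : List String) (a2 a3 a4 : List Char) :
    bs.foldl glueStep ((a2, a3, a4), rs, false) =
      ((a2 ++ pref (bs.map String.toList),
        a3 ++ pref (bs.map (fun b => List.replicate (PySem.Str.len b).toNat '-')),
        a4 ++ pref ((bs.zip rs).map (fun br => pieceOf br.1 br.2))),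
       rs.drop bs.length, false) := by
  induction bs generalizing rs a2 a3 a4 with
  | nil => simp [pref]
  | cons b bs ih =>
    cases rs with
    | nil => simp [glueStep, ih, pref, List.flatMap_cons]
    | cons r rt => simp [glueStep, ih, pref, pieceOf, List.flatMap_cons]

-- and from the initial state (first = true): the rows are '    '-joins
lemma glueStep_foldl_true (bs rs : List String) :
    (bs.foldl glueStep (([], [], []), rs, true)).1 =
      (PySem.Chars.join "    ".toList (bs.map String.toList),
       PySem.Chars.join "    ".toList (bs.map (fun b => List.replicate (PySem.Str.len b).toNat '-')),
       PySem.Chars.join "    ".toList ((bs.zip rs).map (fun br => pieceOf br.1 br.2))) := by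
  cases bs with
  | nil => simp [PySem.Chars.join_nil]
  | cons b bs =>
    cases rs with
    | nil =>
      rw [List.foldl_cons, show glueStep (([], [], []), ([] : List String), true) b
            = ((b.toList, List.replicate (PySem.Str.len b).toNat '-', []), [], false) from rfl,
          glueStep_foldl_false]
      simp [join_eq_head_pref, pref, PySem.Chars.join_nil]
    | cons r rt =>
      rw [List.foldl_cons, show glueStep (([], [], []), r :: rt, true) b
            = ((b.toList, List.replicate (PySem.Str.len b).toNat '-',
                List.replicate ((PySem.Str.len b - PySem.Str.len r).toNat) ' ' ++ r.toList), rt, false) from rfl,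
          glueStep_foldl_false]
      simp [join_eq_head_pref, pref, pieceOf]

-- the second component of normalizer's foldl, with the accumulator generalized
lemma normalizer_snd (l1 l2 : List String) (acc : List String × List String) :
    ((l1.zip l2).foldl
      (fun (acc : List String × List String) ab =>
        let a := ab.1; let b := ab.2
        if PySem.Str.len a > PySem.Str.len b then
          (acc.1 ++ [String.ofList ("  ".toList ++ a.toList)],
           acc.2 ++ [String.ofList (List.replicate ((PySem.Str.len a - PySem.Str.len b).natAbs + 2) ' ' ++ b.toList)])
        else if PySem.Str.len a < PySem.Str.len b then
          (acc.1 ++ [String.ofList (List.replicate ((PySem.Str.len a - PySem.Str.len b).natAbs + 2) ' ' ++ a.toList)],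
           acc.2 ++ [String.ofList ("  ".toList ++ b.toList)])
        else
          (acc.1 ++ [String.ofList ("  ".toList ++ a.toList)],
           acc.2 ++ [String.ofList ("  ".toList ++ b.toList)]))
      acc).2
    = acc.2 ++ (l1.zip l2).map (fun ab =>
        if PySem.Str.len ab.1 > PySem.Str.len ab.2 then
          String.ofList (List.replicate ((PySem.Str.len ab.1 - PySem.Str.len ab.2).natAbs + 2) ' ' ++ ab.2.toList)
        else String.ofList ("  ".toList ++ ab.2.toList)) := by
  induction l1 generalizing l2 acc with
  | nil => simp
  | cons a l1 ih =>
    cases l2 with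
    | nil => simp
    | cons b l2 =>
      simp only [List.zip_cons_cons, List.foldl_cons, List.map_cons]
      rw [ih]
      by_cases h1 : PySem.Str.len a > PySem.Str.len b
      · have h1' : b.length < a.length := by simp [pysem] at h1; omega
        simp [h1']
      · by_cases h2 : PySem.Str.len a < PySem.Str.len b
        · have h1' : ¬ b.length < a.length := by simp [pysem] at h1; omega
          have h2' : a.length < b.length := by simp [pysem] at h2; omega
          simp [h1', h2']
        · have h1' : ¬ b.length < a.length := by simp [pysem] at h1; omega
          have h2' : ¬ a.length < b.length := by simp [pysem] at h2; omega
          simp [h1', h2']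

-- stripping the two leading spaces from normalizer's padded result is exactly B's pieceOf
lemma strip_two_eq_piece (a b : String) :
    PySem.Str.slice
      (if PySem.Str.len a > PySem.Str.len b then
        String.ofList (List.replicate ((PySem.Str.len a - PySem.Str.len b).natAbs + 2) ' ' ++ b.toList)
      else String.ofList ("  ".toList ++ b.toList)) (some 2) none
    = String.ofList (pieceOf a b) := by
  by_cases h : PySem.Str.len a > PySem.Str.len b
  · rw [if_pos h]
    apply String.toList_inj.mp
    simp [pysem, pieceOf]
    rw [show ((a.length : Int) - (b.length : Int)).natAbs + 2
          = 2 + ((a.length : Int) - (b.length : Int)).natAbs from by omega,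
        List.replicate_add, List.append_assoc, List.drop_left']
    · congr 2
      simp [pysem] at h
      omega
    · simp
  · rw [if_neg h]
    apply String.toList_inj.mp
    have hle : a.length ≤ b.length := by simp [pysem] at h; omega
    simp only [PySem.Str.toList_slice, PySem.Chars.slice_eq_listSlice, pieceOf]
    rw [PySem.List.slice_from _ (by norm_num)]
    simp [hle]

-- composing A's del_two_spaces over its padded list gives B's piece list
lemma map_strip (zs : List (String × String)) :
    List.map (fun string => PySem.Str.slice string (some 2) none)
      (zs.map (fun ab =>
        if PySem.Str.len ab.1 > PySem.Str.len ab.2 then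
          String.ofList (List.replicate ((PySem.Str.len ab.1 - PySem.Str.len ab.2).natAbs + 2) ' ' ++ ab.2.toList)
        else String.ofList ("  ".toList ++ ab.2.toList)))
    = zs.map (fun br => String.ofList (pieceOf br.1 br.2)) := by
  rw [List.map_map]
  exact List.map_congr_left fun ab _ => strip_two_eq_piece ab.1 ab.2

-- dropping the final newline of the accumulated block (general list shape)
lemma dropLast_three (b c d : List Char) :
    ('\n' :: (b ++ '\n' :: (c ++ '\n' :: (d ++ ['\n'])))).dropLast
      = '\n' :: (b ++ '\n' :: (c ++ '\n' :: d)) := by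
  rw [show '\n' :: (b ++ '\n' :: (c ++ '\n' :: (d ++ ['\n'])))
        = ('\n' :: (b ++ '\n' :: (c ++ '\n' :: d))) ++ ['\n'] by simp]
  exact List.dropLast_concat ..

-- the row-accumulating loop, chopped by [:-1], is the four joined rows glued by '\n'
lemma assemble_eq (r1 r2 r3 r4 : List String) :
    PySem.Str.slice ([r1, r2, r3, r4].foldl
      (fun acc row => String.ofList (acc.toList ++ (PySem.Str.join "    " row).toList ++ "\n".toList)) "")
      none (some (-1))
    = String.ofList ((PySem.Str.join "    " r1).toList
        ++ '\n' :: (PySem.Str.join "    " r2).toList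
        ++ '\n' :: (PySem.Str.join "    " r3).toList
        ++ '\n' :: (PySem.Str.join "    " r4).toList) := by
  apply String.toList_inj.mp
  simp only [List.foldl_cons, List.foldl_nil]
  rw [PySem.Str.slice_to_neg_one]
  simp
  exact dropLast_three _ _ _

-- ===== VERDICT =====
set_option maxHeartbeats 1000000 in
theorem glue_spec : Claim_equal_glue := by
  intro top botton results _
  show glue top botton results = glue_alt top botton results
  simp only [glue, glue_alt, normalizer]
  rw [normalizer_snd]
  simp only [List.nil_append]
  rw [map_strip, assemble_eq]
  apply congrArg PySem.Str.rstrip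
  apply String.toList_inj.mp
  have ht := glueStep_foldl_true botton results
  simp [pysem, pieceOf, Function.comp_def, ht]
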